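-- pv_equiv track=rewrite | github.com/byarmis/AdventOfCode | AoC2018/Day_22/Day_22.py | part_1
-- ===== SOURCE A (Python) =====
-- def part_1(depth, target):
--     tx, ty = target
--     c = [[None for _ in range(ty+1)] for _ in range(tx+1)]
--     c[0][0] = 0
--     c[tx][ty] = 0
--
--     def erosion(x, y):
--         if c[x][y] is not None:
--             pass
--
--         elif y == 0:
--             c[x][y] = x * 16807
--
--         elif x == 0:
--             c[x][y] = y * 48271
--
--         else:
--             c[x][y] = erosion(x-1, y) * erosion(x, y-1)
--
--         return (c[x][y] + depth) % 20183
--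
--     return sum(erosion(x,y) % 3 for x in range(tx+1) for y in range(ty+1))
-- ===== SOURCE B (Python) =====
-- def part_1(depth, target):
--     tx, ty = target
--     risk = 0
--     prev = []
--     for x in range(tx + 1):
--         cur = []
--         for y in range(ty + 1):
--             if (x, y) == (0, 0) or (x, y) == (tx, ty):
--                 geo = 0
--             elif y == 0:
--                 geo = x * 16807
--             elif x == 0:
--                 geo = y * 48271
--             else:
--                 geo = prev[y] * cur[y - 1]
--             e = (geo + depth) % 20183
--             cur.append(e)
--             risk += e % 3
--         prev = cur
--     return risk
-- ===== Notes on version B (the rewrite author's own statement) =====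
-- stated objective: alternative
-- what changed: replaces A's memoized top-down recursion over a None-grid by an explicit bottom-up rolling-row DP (prev/cur erosion-level rows) accumulating the risk in one pass
import Mathlib
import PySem

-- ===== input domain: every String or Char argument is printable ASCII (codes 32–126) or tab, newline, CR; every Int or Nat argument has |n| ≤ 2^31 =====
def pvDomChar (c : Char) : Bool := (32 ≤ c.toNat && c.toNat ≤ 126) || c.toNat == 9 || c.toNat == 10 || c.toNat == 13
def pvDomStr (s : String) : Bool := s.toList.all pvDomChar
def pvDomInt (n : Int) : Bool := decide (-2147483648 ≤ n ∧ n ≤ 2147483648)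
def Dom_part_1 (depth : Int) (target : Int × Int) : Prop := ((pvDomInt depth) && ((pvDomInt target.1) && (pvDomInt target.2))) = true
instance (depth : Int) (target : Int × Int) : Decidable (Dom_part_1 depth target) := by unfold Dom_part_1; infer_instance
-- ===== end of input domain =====

-- B replaces A's memoized top-down recursion over a None-grid by an explicit bottom-up rolling-row
-- DP (prev/cur rows of erosion levels). Equivalence is proved on targets with nonnegative
-- coordinates (elsewhere Python A raises IndexError and returns no value; B's loops are empty there).

-- ===== PORT A =====
-- A's grid c (a Python list of lists holding None or a geologic index) is kept as
-- Array (Array (Option Int)); all indexing A performs is in range on admitted inputs, so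
-- getD/setIfInBounds are exact for c[x][y] reads/writes.
def gridGet (c : Array (Array (Option Int))) (x y : Nat) : Option Int :=
  (c.getD x #[]).getD y none

def gridSet (c : Array (Array (Option Int))) (x y : Nat) (v : Option Int) :
    Array (Array (Option Int)) := c.setIfInBounds x ((c.getD x #[]).setIfInBounds y v)

def eroA (d : Int) (x y : Nat) (c : Array (Array (Option Int))) :
    Array (Array (Option Int)) × Int :=
  match gridGet c x y with
  | some v => (c, PySem.Int.mod (v + d) 20183)
  | none =>
    match x, y with
    | x, 0 =>
      (gridSet c x 0 (some ((x : Int) * 16807)), PySem.Int.mod ((x : Int) * 16807 + d) 20183)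
    | 0, y+1 =>
      (gridSet c 0 (y+1) (some (((y+1 : Nat) : Int) * 48271)),
       PySem.Int.mod (((y+1 : Nat) : Int) * 48271 + d) 20183)
    | x+1, y+1 =>
      let r1 := eroA d x (y+1) c
      let r2 := eroA d (x+1) y r1.1
      (gridSet r2.1 (x+1) (y+1) (some (r1.2 * r2.2)), PySem.Int.mod (r1.2 * r2.2 + d) 20183)
  termination_by x + y

def part_1 (depth : Int) (target : Int × Int) : Int :=
  let tx := target.1
  let ty := target.2
  -- c = [[None for _ in range(ty+1)] for _ in range(tx+1)] (each row the same all-None value);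
  -- c[0][0] = 0; c[tx][ty] = 0
  -- (Pre_ excludes negative coordinates, where Python's c[0][0] = 0 raises IndexError)
  let c0 := Array.replicate (tx + 1).toNat (Array.replicate (ty + 1).toNat (none : Option Int))
  let c1 := gridSet c0 0 0 (some 0)
  let c2 := gridSet c1 tx.toNat ty.toNat (some 0)
  let st := (List.range (tx + 1).toNat).foldl (fun (st : Array (Array (Option Int)) × Int) (x : Nat) =>
      (List.range (ty + 1).toNat).foldl (fun st (y : Nat) =>
        let r := eroA depth x y st.1
        (r.1, st.2 + PySem.Int.mod r.2 3)) st) (c2, (0 : Int))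
  st.2

-- ===== PORT B =====
def part_1_alt (depth : Int) (target : Int × Int) : Int :=
  let tx := target.1
  let ty := target.2
  let st := (List.range (tx + 1).toNat).foldl (fun (st : Array Int × Int) (x : Nat) =>
      (List.range (ty + 1).toNat).foldl (fun (st2 : Array Int × Int) (y : Nat) =>
        let geo : Int :=
          if (x = 0 ∧ y = 0) ∨ ((x : Int) = tx ∧ (y : Int) = ty) then 0
          else if y = 0 then (x : Int) * 16807
          else if x = 0 then (y : Int) * 48271
          -- prev[y] * cur[y-1]: both indices are always in range, so the default is unreachable
          else (st.1.getD y 0) * (st2.1.getD (y - 1) 0)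
        let e := PySem.Int.mod (geo + depth) 20183
        (st2.1.push e, st2.2 + PySem.Int.mod e 3)) (#[], st.2)) (#[], 0)
  st.2

-- ===== PRECONDITION & SPEC =====
-- Pre_ excludes targets with a negative coordinate: there Python A raises IndexError (c[0][0] on an
-- empty/short grid) and returns no value.
def Pre_part_1 (depth : Int) (target : Int × Int) : Prop := 0 ≤ target.1 ∧ 0 ≤ target.2
instance (depth : Int) (target : Int × Int) : Decidable (Pre_part_1 depth target) := by unfold Pre_part_1; infer_instance
def pvWitness_part_1 : Int × (Int × Int) := (510, (10, 10))

def Spec_part_1 (depth : Int) (target : Int × Int) (out : Int) : Prop := out = part_1_alt depth target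
instance (depth : Int) (target : Int × Int) (out : Int) : Decidable (Spec_part_1 depth target out) := by unfold Spec_part_1; infer_instance

-- ===== CLAIM (what is proved, stated in full; the proofs are below) =====
def Claim_equal_part_1 : Prop := ∀ (depth : Int) (target : Int × Int), Dom_part_1 depth target → Pre_part_1 depth target → Spec_part_1 depth target (part_1 depth target)

-- ===== LEMMAS AND PROOFS =====

-- The mathematical geologic index G(x,y) both programs compute (mouth and target forced to 0).
def Gf (tx ty d : Int) : Nat → Nat → Int
  | 0, 0 => 0
  | x+1, 0 => if ((x+1 : Nat) : Int) = tx ∧ (0 : Int) = ty then 0 else ((x+1 : Nat) : Int) * 16807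
  | 0, y+1 => if (0 : Int) = tx ∧ ((y+1 : Nat) : Int) = ty then 0 else ((y+1 : Nat) : Int) * 48271
  | x+1, y+1 =>
      if ((x+1 : Nat) : Int) = tx ∧ ((y+1 : Nat) : Int) = ty then 0
      else PySem.Int.mod (Gf tx ty d x (y+1) + d) 20183 * PySem.Int.mod (Gf tx ty d (x+1) y + d) 20183
  termination_by x y => x + y

-- The erosion level E(x,y).
def Ef (tx ty d : Int) (x y : Nat) : Int := PySem.Int.mod (Gf tx ty d x y + d) 20183

lemma Gf_target (tx ty d : Int) (x y : Nat) (hx : (x : Int) = tx) (hy : (y : Int) = ty) :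
    Gf tx ty d x y = 0 := by
  match x, y with
  | 0, 0 => simp [Gf]
  | a+1, 0 => simp only [Gf]; rw [if_pos ⟨hx, by simpa using hy⟩]
  | 0, b+1 => simp only [Gf]; rw [if_pos ⟨by simpa using hx, hy⟩]
  | a+1, b+1 => simp only [Gf]; rw [if_pos ⟨hx, hy⟩]

-- getD facts for Array set/push/replicate.
lemma agetD_of_le {α : Type} (a : Array α) (i : Nat) (d : α) (h : a.size ≤ i) :
    a.getD i d = d := by
  rw [Array.getD_eq_getD_getElem?, Array.getElem?_eq_none (by omega)]
  rfl

lemma agetD_set {α : Type} (c : Array α) (i j : Nat) (v d : α) :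
    (c.setIfInBounds i v).getD j d = if i = j ∧ i < c.size then v else c.getD j d := by
  rw [Array.getD_eq_getD_getElem?, Array.getElem?_setIfInBounds]
  by_cases h1 : i = j
  · by_cases h2 : i < c.size
    · rw [if_pos h1, if_pos h2, if_pos ⟨h1, h2⟩]
      rfl
    · rw [if_pos h1, if_neg h2, if_neg (by tauto)]
      rw [agetD_of_le c j d (by omega)]
      rfl
  · rw [if_neg h1, if_neg (by tauto), Array.getD_eq_getD_getElem?]

lemma apush_getD {α : Type} (a : Array α) (v d : α) (i : Nat) :
    (a.push v).getD i d = if i = a.size then v else a.getD i d := by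
  rw [Array.getD_eq_getD_getElem?, Array.getElem?_push]
  split_ifs with h
  · rfl
  · rw [Array.getD_eq_getD_getElem?]

lemma agetD_replicate {α : Type} (n : Nat) (v d : α) (i : Nat) :
    (Array.replicate n v).getD i d = if i < n then v else d := by
  rw [Array.getD_eq_getD_getElem?, Array.getElem?_replicate]
  split_ifs <;> rfl

-- Reading/writing a grid cell.
lemma gridGet_set_ne (c : Array (Array (Option Int))) (x y a b : Nat) (v : Option Int)
    (h : ¬(a = x ∧ b = y)) : gridGet (gridSet c x y v) a b = gridGet c a b := by
  rw [gridGet, gridSet, agetD_set]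
  split_ifs with hc1
  · rw [agetD_set]
    rw [if_neg (fun hy => h ⟨hc1.1.symm, hy.1.symm⟩)]
    rw [gridGet, hc1.1]
  · rw [gridGet]

lemma gridGet_set_self (c : Array (Array (Option Int))) (x y : Nat) (v : Option Int) :
    gridGet (gridSet c x y v) x y = v ∨ gridGet (gridSet c x y v) x y = gridGet c x y := by
  rw [gridGet, gridSet, agetD_set]
  split_ifs with hc1
  · rw [agetD_set]
    split_ifs with hc2
    · exact Or.inl rfl
    · exact Or.inr (by rw [gridGet])
  · exact Or.inr (by rw [gridGet])

lemma gridGet_set_within (c : Array (Array (Option Int))) (x y : Nat) (v : Option Int)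
    (hx : x < c.size) (hy : y < (c.getD x #[]).size) :
    gridGet (gridSet c x y v) x y = v := by
  rw [gridGet, gridSet, agetD_set, if_pos ⟨rfl, hx⟩, agetD_set, if_pos ⟨rfl, hy⟩]

lemma gridGet_init (X Y a b : Nat) :
    gridGet (Array.replicate X (Array.replicate Y (none : Option Int))) a b = none := by
  rw [gridGet, agetD_replicate]
  split_ifs with h
  · rw [agetD_replicate]
    split_ifs <;> rfl
  · exact agetD_of_le _ _ _ (by simp)

-- A-side invariant: memoised entries are exactly geologic indices; mouth and target are filled.
def InvA (tx ty d : Int) (c : Array (Array (Option Int))) : Prop :=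
  gridGet c 0 0 = some 0 ∧ gridGet c tx.toNat ty.toNat = some 0 ∧
  ∀ x y v, gridGet c x y = some v → v = Gf tx ty d x y

lemma notTgt_of_none (tx ty d : Int) (htx : 0 ≤ tx) {c : Array (Array (Option Int))}
    (hc : InvA tx ty d c) {x y : Nat} (h : gridGet c x y = none) :
    ¬((x : Int) = tx ∧ (y : Int) = ty) := by
  rintro ⟨h1, h2⟩
  have hx : tx.toNat = x := by omega
  have hy : ty.toNat = y := by omega
  have h3 := hc.2.1
  rw [hx, hy, h] at h3
  cases h3

lemma notMouth_of_none (tx ty d : Int) {c : Array (Array (Option Int))}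
    (hc : InvA tx ty d c) {x y : Nat} (h : gridGet c x y = none) : ¬(x = 0 ∧ y = 0) := by
  rintro ⟨rfl, rfl⟩
  have h1 := hc.1
  rw [h] at h1
  cases h1

lemma InvA_set (tx ty d : Int) (htx : 0 ≤ tx) (hty : 0 ≤ ty)
    {c : Array (Array (Option Int))} (hc : InvA tx ty d c) {x y : Nat} {g : Int}
    (hM : ¬(x = 0 ∧ y = 0)) (hT : ¬((x : Int) = tx ∧ (y : Int) = ty))
    (hg : g = Gf tx ty d x y) : InvA tx ty d (gridSet c x y (some g)) := by
  refine ⟨?_, ?_, ?_⟩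
  · rw [gridGet_set_ne c x y 0 0 _ (by tauto)]
    exact hc.1
  · rw [gridGet_set_ne c x y tx.toNat ty.toNat _ (by rintro ⟨h1, h2⟩; exact hT ⟨by omega, by omega⟩)]
    exact hc.2.1
  · intro a b v hv
    by_cases hk : a = x ∧ b = y
    · obtain ⟨rfl, rfl⟩ := hk
      rcases gridGet_set_self c a b (some g) with h | h
      · rw [hv] at h
        injection h with h
        rw [h, hg]
      · rw [hv] at h
        exact hc.2.2 a b v h.symm
    · rw [gridGet_set_ne c x y a b _ hk] at hv
      exact hc.2.2 a b v hv

lemma eroA_correct (tx ty d : Int) (htx : 0 ≤ tx) (hty : 0 ≤ ty) :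
    ∀ x y c, InvA tx ty d c →
      InvA tx ty d (eroA d x y c).1 ∧ (eroA d x y c).2 = Ef tx ty d x y := by
  suffices H : ∀ n x y, x + y ≤ n → ∀ c, InvA tx ty d c →
      InvA tx ty d (eroA d x y c).1 ∧ (eroA d x y c).2 = Ef tx ty d x y by
    intro x y c hc; exact H (x + y) x y le_rfl c hc
  intro n
  induction n using Nat.strong_induction_on with
  | _ n ih =>
    intro x y hxy c hc
    rw [eroA.eq_def]
    cases hget : gridGet c x y with
    | some v =>
      refine ⟨hc, ?_⟩
      show PySem.Int.mod (v + d) 20183 = Ef tx ty d x y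
      rw [hc.2.2 x y v hget, Ef]
    | none =>
      have hT := notTgt_of_none tx ty d htx hc hget
      have hM := notMouth_of_none tx ty d hc hget
      cases y with
      | zero =>
        cases x with
        | zero => exact absurd ⟨rfl, rfl⟩ hM
        | succ a =>
          have hGf : Gf tx ty d (a+1) 0 = ((a+1 : Nat) : Int) * 16807 := by
            simp only [Gf]
            rw [if_neg (by rintro ⟨p, q⟩; exact hT ⟨p, by simpa using q⟩)]
          refine ⟨?_, ?_⟩
          · show InvA tx ty d (gridSet c (a+1) 0 (some (((a+1 : Nat) : Int) * 16807)))
            exact InvA_set tx ty d htx hty hc (by simp) hT hGf.symm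
          · show PySem.Int.mod (((a+1 : Nat) : Int) * 16807 + d) 20183 = Ef tx ty d (a+1) 0
            rw [Ef, hGf]
      | succ b =>
        cases x with
        | zero =>
          have hGf : Gf tx ty d 0 (b+1) = ((b+1 : Nat) : Int) * 48271 := by
            simp only [Gf]
            rw [if_neg (by rintro ⟨p, q⟩; exact hT ⟨by simpa using p, q⟩)]
          refine ⟨?_, ?_⟩
          · show InvA tx ty d (gridSet c 0 (b+1) (some (((b+1 : Nat) : Int) * 48271)))
            exact InvA_set tx ty d htx hty hc (by simp) hT hGf.symm
          · show PySem.Int.mod (((b+1 : Nat) : Int) * 48271 + d) 20183 = Ef tx ty d 0 (b+1)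
            rw [Ef, hGf]
        | succ a =>
          obtain ⟨inv1, hv1⟩ := ih (n - 1) (by omega) a (b+1) (by omega) c hc
          obtain ⟨inv2, hv2⟩ := ih (n - 1) (by omega) (a+1) b (by omega) _ inv1
          have hGf : Gf tx ty d (a+1) (b+1) = Ef tx ty d a (b+1) * Ef tx ty d (a+1) b := by
            simp only [Gf]
            rw [if_neg hT]
            rfl
          refine ⟨?_, ?_⟩
          · show InvA tx ty d (gridSet (eroA d (a+1) b (eroA d a (b+1) c).1).1 (a+1) (b+1)
              (some ((eroA d a (b+1) c).2 * (eroA d (a+1) b (eroA d a (b+1) c).1).2)))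
            exact InvA_set tx ty d htx hty inv2 (by simp) hT (by rw [hv1, hv2, hGf])
          · show PySem.Int.mod ((eroA d a (b+1) c).2 * (eroA d (a+1) b (eroA d a (b+1) c).1).2 + d)
              20183 = Ef tx ty d (a+1) (b+1)
            rw [hv1, hv2, ← hGf]
            rfl

def refSum (tx ty d : Int) (X Y : Nat) : Int :=
  (List.range X).foldl (fun s x =>
    (List.range Y).foldl (fun s y => s + PySem.Int.mod (Ef tx ty d x y) 3) s) 0

lemma A_inner (tx ty d : Int) (htx : 0 ≤ tx) (hty : 0 ≤ ty) (x : Nat) :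
    ∀ (m : Nat) (c : Array (Array (Option Int))) (s : Int), InvA tx ty d c →
      InvA tx ty d ((List.range m).foldl (fun (st : Array (Array (Option Int)) × Int) (y : Nat) => ((eroA d x y st.1).1, st.2 + PySem.Int.mod (eroA d x y st.1).2 3)) (c, s)).1 ∧
      ((List.range m).foldl (fun (st : Array (Array (Option Int)) × Int) (y : Nat) => ((eroA d x y st.1).1, st.2 + PySem.Int.mod (eroA d x y st.1).2 3)) (c, s)).2 =
        (List.range m).foldl (fun s y => s + PySem.Int.mod (Ef tx ty d x y) 3) s := by
  intro m
  induction m with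
  | zero => intro c s hc; exact ⟨hc, rfl⟩
  | succ m ihm =>
    intro c s hc
    rw [List.range_succ, List.foldl_append, List.foldl_append]
    simp only [List.foldl_cons, List.foldl_nil]
    obtain ⟨ih1, ih2⟩ := ihm c s hc
    rcases hst : (List.range m).foldl (fun (st : Array (Array (Option Int)) × Int) (y : Nat) => ((eroA d x y st.1).1, st.2 + PySem.Int.mod (eroA d x y st.1).2 3)) (c, s) with ⟨c', s'⟩
    rw [hst] at ih1 ih2
    have ih1' : InvA tx ty d c' := ih1
    have ih2' : s' = (List.range m).foldl
        (fun s y => s + PySem.Int.mod (Ef tx ty d x y) 3) s := ih2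
    obtain ⟨h1, h2⟩ := eroA_correct tx ty d htx hty x m c' ih1'
    exact ⟨h1, by rw [h2, ih2']⟩

lemma A_outer (tx ty d : Int) (htx : 0 ≤ tx) (hty : 0 ≤ ty) (Y : Nat) :
    ∀ (X : Nat) (c : Array (Array (Option Int))) (s : Int), InvA tx ty d c →
      ((List.range X).foldl (fun (st : Array (Array (Option Int)) × Int) (x : Nat) =>
          (List.range Y).foldl (fun (st : Array (Array (Option Int)) × Int) (y : Nat) => ((eroA d x y st.1).1, st.2 + PySem.Int.mod (eroA d x y st.1).2 3)) st) (c, s)).2 =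
        (List.range X).foldl (fun s x =>
          (List.range Y).foldl (fun s y => s + PySem.Int.mod (Ef tx ty d x y) 3) s) s ∧
      InvA tx ty d ((List.range X).foldl (fun (st : Array (Array (Option Int)) × Int) (x : Nat) =>
          (List.range Y).foldl (fun (st : Array (Array (Option Int)) × Int) (y : Nat) => ((eroA d x y st.1).1, st.2 + PySem.Int.mod (eroA d x y st.1).2 3)) st) (c, s)).1 := by
  intro X
  induction X with
  | zero => intro c s hc; exact ⟨rfl, hc⟩
  | succ X ihX =>
    intro c s hc
    rw [List.range_succ, List.foldl_append, List.foldl_append]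
    simp only [List.foldl_cons, List.foldl_nil]
    obtain ⟨ih2, ih1⟩ := ihX c s hc
    rcases hst : (List.range X).foldl (fun (st : Array (Array (Option Int)) × Int) (x : Nat) =>
        (List.range Y).foldl (fun (st : Array (Array (Option Int)) × Int) (y : Nat) => ((eroA d x y st.1).1, st.2 + PySem.Int.mod (eroA d x y st.1).2 3)) st) (c, s) with ⟨c', s'⟩
    rw [hst] at ih2 ih1
    have ih1' : InvA tx ty d c' := ih1
    have ih2' : s' = (List.range X).foldl (fun s x =>
        (List.range Y).foldl (fun s y => s + PySem.Int.mod (Ef tx ty d x y) 3) s) s := ih2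
    obtain ⟨h1, h2⟩ := A_inner tx ty d htx hty X Y c' s' ih1'
    exact ⟨by rw [h2, ih2'], h1⟩

lemma InvA_init (tx ty d : Int) (htx : 0 ≤ tx) (hty : 0 ≤ ty) :
    InvA tx ty d (gridSet (gridSet (Array.replicate (tx + 1).toNat
        (Array.replicate (ty + 1).toNat (none : Option Int)))
      0 0 (some 0)) tx.toNat ty.toNat (some 0)) := by
  have hX : 0 < (tx + 1).toNat := by omega
  have hY : 0 < (ty + 1).toNat := by omega
  have htxX : tx.toNat < (tx + 1).toNat := by omega
  have htyY : ty.toNat < (ty + 1).toNat := by omega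
  set c0 := Array.replicate (tx + 1).toNat
    (Array.replicate (ty + 1).toNat (none : Option Int)) with hc0
  have hlen : c0.size = (tx + 1).toNat := by rw [hc0, Array.size_replicate]
  have hrow : ∀ a, a < (tx + 1).toNat →
      c0.getD a #[] = Array.replicate (ty + 1).toNat (none : Option Int) := by
    intro a ha
    rw [hc0, agetD_replicate, if_pos ha]
  have hmouth : gridGet (gridSet c0 0 0 (some 0)) 0 0 = some 0 := by
    refine gridGet_set_within c0 0 0 _ (by omega) ?_
    rw [hrow 0 hX, Array.size_replicate]
    omega
  have hlen1 : (gridSet c0 0 0 (some 0)).size = (tx + 1).toNat := by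
    rw [gridSet, Array.size_setIfInBounds]
    exact hlen
  have hrow1 : ((gridSet c0 0 0 (some 0)).getD tx.toNat #[]).size = (ty + 1).toNat := by
    rw [gridSet, agetD_set]
    split_ifs with h0
    · rw [Array.size_setIfInBounds, hrow 0 hX, Array.size_replicate]
    · rw [hrow tx.toNat htxX, Array.size_replicate]
  refine ⟨?_, ?_, ?_⟩
  · by_cases h00 : tx.toNat = 0 ∧ ty.toNat = 0
    · have hr := hrow1
      rw [h00.1] at hr
      rw [h00.1, h00.2]
      exact gridGet_set_within _ 0 0 _ (by omega) (by omega)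
    · rw [gridGet_set_ne _ _ _ 0 0 _ (by rintro ⟨h1, h2⟩; exact h00 ⟨h1.symm, h2.symm⟩)]
      exact hmouth
  · exact gridGet_set_within _ tx.toNat ty.toNat _ (by omega) (by omega)
  · intro a b v hv
    by_cases hk : a = tx.toNat ∧ b = ty.toNat
    · rcases gridGet_set_self (gridSet c0 0 0 (some 0)) tx.toNat ty.toNat (some 0) with h | h
      · rw [hk.1, hk.2, h] at hv
        injection hv with hv
        rw [← hv, hk.1, hk.2, Gf_target tx ty d _ _ (by omega) (by omega)]
      · rw [hk.1, hk.2, h] at hv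
        by_cases hk0 : tx.toNat = 0 ∧ ty.toNat = 0
        · rw [hk0.1, hk0.2, hmouth] at hv
          injection hv with hv
          rw [← hv, hk.1, hk.2, hk0.1, hk0.2]
          simp [Gf]
        · rw [gridGet_set_ne c0 0 0 tx.toNat ty.toNat (some 0) hk0, hc0, gridGet_init] at hv
          cases hv
    · rw [gridGet_set_ne _ tx.toNat ty.toNat a b (some 0) hk] at hv
      by_cases hk0 : a = 0 ∧ b = 0
      · rw [hk0.1, hk0.2, hmouth] at hv
        injection hv with hv
        rw [← hv, hk0.1, hk0.2]
        simp [Gf]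
      · rw [gridGet_set_ne c0 0 0 a b (some 0) hk0, hc0, gridGet_init] at hv
        cases hv

lemma partA_eq_ref (depth : Int) (target : Int × Int) (h1 : 0 ≤ target.1) (h2 : 0 ≤ target.2) :
    part_1 depth target = refSum target.1 target.2 depth (target.1 + 1).toNat (target.2 + 1).toNat := by
  rw [part_1, refSum]
  exact (A_outer target.1 target.2 depth h1 h2 (target.2 + 1).toNat (target.1 + 1).toNat _ 0
    (InvA_init target.1 target.2 depth h1 h2)).1

-- B-side: the geologic-index value of one DP step.
lemma B_geo (tx ty d : Int) (k j : Nat) (p c : Int)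
    (hp : k ≠ 0 → j ≠ 0 → p = Ef tx ty d (k - 1) j)
    (hc : k ≠ 0 → j ≠ 0 → c = Ef tx ty d k (j - 1)) :
    (if (k = 0 ∧ j = 0) ∨ ((k : Int) = tx ∧ (j : Int) = ty) then (0 : Int)
     else if j = 0 then (k : Int) * 16807
     else if k = 0 then (j : Int) * 48271
     else p * c) = Gf tx ty d k j := by
  split_ifs with h1 h2 h3
  · rcases h1 with ⟨rfl, rfl⟩ | ⟨ha, hb⟩
    · simp [Gf]
    · exact (Gf_target tx ty d k j ha hb).symm
  · subst h2
    have hk : k ≠ 0 := fun h => h1 (Or.inl ⟨h, rfl⟩)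
    obtain ⟨a, rfl⟩ := Nat.exists_eq_succ_of_ne_zero hk
    simp only [Gf]
    rw [if_neg (fun ⟨p, q⟩ => h1 (Or.inr ⟨p, by simpa using q⟩))]
  · subst h3
    obtain ⟨b, rfl⟩ := Nat.exists_eq_succ_of_ne_zero h2
    simp only [Gf]
    rw [if_neg (fun ⟨p, q⟩ => h1 (Or.inr ⟨by simpa using p, q⟩))]
  · rw [hp h3 h2, hc h3 h2]
    obtain ⟨a, rfl⟩ := Nat.exists_eq_succ_of_ne_zero h3
    obtain ⟨b, rfl⟩ := Nat.exists_eq_succ_of_ne_zero h2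
    simp only [Gf]
    rw [if_neg (fun ⟨p, q⟩ => h1 (Or.inr ⟨p, q⟩))]
    rfl

lemma B_inner (tx ty d : Int) (Y k : Nat) (P : Array Int)
    (hP : ∀ y, y < Y → k ≠ 0 → P.getD y 0 = Ef tx ty d (k - 1) y) :
    ∀ j, j ≤ Y → ∀ (s : Int),
      ((List.range j).foldl (fun (st2 : Array Int × Int) (y : Nat) => (st2.1.push (PySem.Int.mod ((if (k = 0 ∧ y = 0) ∨ ((k : Int) = tx ∧ (y : Int) = ty) then (0 : Int) else if y = 0 then (k : Int) * 16807 else if k = 0 then (y : Int) * 48271 else (P.getD y 0) * (st2.1.getD (y - 1) 0)) + d) 20183), st2.2 + PySem.Int.mod (PySem.Int.mod ((if (k = 0 ∧ y = 0) ∨ ((k : Int) = tx ∧ (y : Int) = ty) then (0 : Int) else if y = 0 then (k : Int) * 16807 else if k = 0 then (y : Int) * 48271 else (P.getD y 0) * (st2.1.getD (y - 1) 0)) + d) 20183) 3)) (#[], s)).1.size = j ∧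
      (∀ b, b < j → ((List.range j).foldl (fun (st2 : Array Int × Int) (y : Nat) => (st2.1.push (PySem.Int.mod ((if (k = 0 ∧ y = 0) ∨ ((k : Int) = tx ∧ (y : Int) = ty) then (0 : Int) else if y = 0 then (k : Int) * 16807 else if k = 0 then (y : Int) * 48271 else (P.getD y 0) * (st2.1.getD (y - 1) 0)) + d) 20183), st2.2 + PySem.Int.mod (PySem.Int.mod ((if (k = 0 ∧ y = 0) ∨ ((k : Int) = tx ∧ (y : Int) = ty) then (0 : Int) else if y = 0 then (k : Int) * 16807 else if k = 0 then (y : Int) * 48271 else (P.getD y 0) * (st2.1.getD (y - 1) 0)) + d) 20183) 3)) (#[], s)).1.getD b 0 = Ef tx ty d k b) ∧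
      ((List.range j).foldl (fun (st2 : Array Int × Int) (y : Nat) => (st2.1.push (PySem.Int.mod ((if (k = 0 ∧ y = 0) ∨ ((k : Int) = tx ∧ (y : Int) = ty) then (0 : Int) else if y = 0 then (k : Int) * 16807 else if k = 0 then (y : Int) * 48271 else (P.getD y 0) * (st2.1.getD (y - 1) 0)) + d) 20183), st2.2 + PySem.Int.mod (PySem.Int.mod ((if (k = 0 ∧ y = 0) ∨ ((k : Int) = tx ∧ (y : Int) = ty) then (0 : Int) else if y = 0 then (k : Int) * 16807 else if k = 0 then (y : Int) * 48271 else (P.getD y 0) * (st2.1.getD (y - 1) 0)) + d) 20183) 3)) (#[], s)).2 =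
        (List.range j).foldl (fun s y => s + PySem.Int.mod (Ef tx ty d k y) 3) s := by
  intro j
  induction j with
  | zero => intro _ s; exact ⟨rfl, fun b hb => absurd hb (by omega), rfl⟩
  | succ j ihj =>
    intro hjY s
    rw [List.range_succ, List.foldl_append, List.foldl_append]
    simp only [List.foldl_cons, List.foldl_nil]
    obtain ⟨ih1, ih2, ih3⟩ := ihj (by omega) s
    rcases hst : (List.range j).foldl (fun (st2 : Array Int × Int) (y : Nat) => (st2.1.push (PySem.Int.mod ((if (k = 0 ∧ y = 0) ∨ ((k : Int) = tx ∧ (y : Int) = ty) then (0 : Int) else if y = 0 then (k : Int) * 16807 else if k = 0 then (y : Int) * 48271 else (P.getD y 0) * (st2.1.getD (y - 1) 0)) + d) 20183), st2.2 + PySem.Int.mod (PySem.Int.mod ((if (k = 0 ∧ y = 0) ∨ ((k : Int) = tx ∧ (y : Int) = ty) then (0 : Int) else if y = 0 then (k : Int) * 16807 else if k = 0 then (y : Int) * 48271 else (P.getD y 0) * (st2.1.getD (y - 1) 0)) + d) 20183) 3)) (#[], s) with ⟨cur, r⟩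
    rw [hst] at ih1 ih2 ih3
    have ih1' : cur.size = j := ih1
    have ih2' : ∀ b, b < j → cur.getD b 0 = Ef tx ty d k b := ih2
    have ih3' : r = (List.range j).foldl
        (fun s y => s + PySem.Int.mod (Ef tx ty d k y) 3) s := ih3
    have hgeo := B_geo tx ty d k j (P.getD j 0) (cur.getD (j - 1) 0)
      (fun hk _ => hP j (by omega) hk)
      (fun _ hj => by
        obtain ⟨b, hb⟩ := Nat.exists_eq_succ_of_ne_zero hj
        rw [hb, Nat.succ_sub_one]
        exact ih2' b (by omega))
    dsimp only
    rw [hgeo]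
    refine ⟨?_, ?_, ?_⟩
    · rw [Array.size_push, ih1']
    · intro b hb
      rw [apush_getD, ih1']
      split_ifs with h
      · subst h
        rfl
      · exact ih2' b (by omega)
    · rw [ih3']
      rfl

lemma B_outer (tx ty d : Int) (Y : Nat) :
    ∀ (X : Nat),
      (∀ y, y < Y → X ≠ 0 →
        (((List.range X).foldl (fun (st : Array Int × Int) (x : Nat) =>
          (List.range Y).foldl (fun (st2 : Array Int × Int) (y : Nat) => (st2.1.push (PySem.Int.mod ((if (x = 0 ∧ y = 0) ∨ ((x : Int) = tx ∧ (y : Int) = ty) then (0 : Int) else if y = 0 then (x : Int) * 16807 else if x = 0 then (y : Int) * 48271 else (st.1.getD y 0) * (st2.1.getD (y - 1) 0)) + d) 20183), st2.2 + PySem.Int.mod (PySem.Int.mod ((if (x = 0 ∧ y = 0) ∨ ((x : Int) = tx ∧ (y : Int) = ty) then (0 : Int) else if y = 0 then (x : Int) * 16807 else if x = 0 then (y : Int) * 48271 else (st.1.getD y 0) * (st2.1.getD (y - 1) 0)) + d) 20183) 3)) (#[], st.2)) (#[], 0)).1).getD y 0 = Ef tx ty d (X - 1) y) ∧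
      ((List.range X).foldl (fun (st : Array Int × Int) (x : Nat) =>
          (List.range Y).foldl (fun (st2 : Array Int × Int) (y : Nat) => (st2.1.push (PySem.Int.mod ((if (x = 0 ∧ y = 0) ∨ ((x : Int) = tx ∧ (y : Int) = ty) then (0 : Int) else if y = 0 then (x : Int) * 16807 else if x = 0 then (y : Int) * 48271 else (st.1.getD y 0) * (st2.1.getD (y - 1) 0)) + d) 20183), st2.2 + PySem.Int.mod (PySem.Int.mod ((if (x = 0 ∧ y = 0) ∨ ((x : Int) = tx ∧ (y : Int) = ty) then (0 : Int) else if y = 0 then (x : Int) * 16807 else if x = 0 then (y : Int) * 48271 else (st.1.getD y 0) * (st2.1.getD (y - 1) 0)) + d) 20183) 3)) (#[], st.2)) (#[], 0)).2 =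
        (List.range X).foldl (fun s x =>
          (List.range Y).foldl (fun s y => s + PySem.Int.mod (Ef tx ty d x y) 3) s) 0 := by
  intro X
  induction X with
  | zero => exact ⟨fun y _ h => absurd rfl h, rfl⟩
  | succ X ihX =>
    rw [List.range_succ, List.foldl_append, List.foldl_append]
    simp only [List.foldl_cons, List.foldl_nil]
    obtain ⟨ih1, ih2⟩ := ihX
    rcases hst : (List.range X).foldl (fun (st : Array Int × Int) (x : Nat) =>
        (List.range Y).foldl (fun (st2 : Array Int × Int) (y : Nat) => (st2.1.push (PySem.Int.mod ((if (x = 0 ∧ y = 0) ∨ ((x : Int) = tx ∧ (y : Int) = ty) then (0 : Int) else if y = 0 then (x : Int) * 16807 else if x = 0 then (y : Int) * 48271 else (st.1.getD y 0) * (st2.1.getD (y - 1) 0)) + d) 20183), st2.2 + PySem.Int.mod (PySem.Int.mod ((if (x = 0 ∧ y = 0) ∨ ((x : Int) = tx ∧ (y : Int) = ty) then (0 : Int) else if y = 0 then (x : Int) * 16807 else if x = 0 then (y : Int) * 48271 else (st.1.getD y 0) * (st2.1.getD (y - 1) 0)) + d) 20183) 3)) (#[], st.2)) (#[], 0) with ⟨prev,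 r⟩
    rw [hst] at ih1 ih2
    have ih2' : r = (List.range X).foldl (fun s x =>
        (List.range Y).foldl (fun s y => s + PySem.Int.mod (Ef tx ty d x y) 3) s) 0 := ih2
    obtain ⟨hB1, hB2, hB3⟩ := B_inner tx ty d Y X prev
      (fun y hy hk => ih1 y hy hk) Y le_rfl r
    have ep : ((prev, r) : Array Int × Int).1 = prev := rfl
    have es : ((prev, r) : Array Int × Int).2 = r := rfl
    rw [ep, es]
    constructor
    · intro y hy _
      rw [hB2 y hy, Nat.add_sub_cancel]
    · rw [hB3, ih2']

lemma partB_eq_ref (depth : Int) (target : Int × Int) (h1 : 0 ≤ target.1) (h2 : 0 ≤ target.2) :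
    part_1_alt depth target = refSum target.1 target.2 depth (target.1 + 1).toNat (target.2 + 1).toNat := by
  rw [part_1_alt, refSum]
  exact (B_outer target.1 target.2 depth (target.2 + 1).toNat (target.1 + 1).toNat).2

-- ===== VERDICT (by name: the statement is the Claim_ definition above) =====
theorem part_1_spec : Claim_equal_part_1 := by
  intro depth target _ hpre
  unfold Spec_part_1
  rw [partA_eq_ref depth target hpre.1 hpre.2, partB_eq_ref depth target hpre.1 hpre.2]
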